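-- pv_equiv track=rewrite | github.com/SpacemanSpiff7/ESKeDiT | eskedit/ktools.py | count_strong_orfs
-- ===== SOURCE A (Python) =====
-- def _kozak_strength(sequence: str) -> int:
--     # 3: Strong = (A/G)NNAUGG
--     # 2: Moderate = (A/G)NNAUGN or NNNAUGG
--     # 1: Weak = NNNAUGN
--     # 0: Nothing = NNNNNNN
--     if len(sequence) != 7:
--         return 0
--     else:
--         score = 0
--         putative_start_codon = sequence[3:6]
--         if putative_start_codon == 'ATG':
--             score += 1
--         else:
--             return 0
--         if sequence[0] == 'A' or sequence[0] == 'G':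
--             score += 1
--         if sequence[6] == 'G':
--             score += 1
--         return score
--
-- def count_strong_orfs(sequence: str, kmer_length: int) -> int:
--     # regex = r'(?<=ATG)(.*)(?=TAA|TAG|TGA)'
--     # TODO: noncanonical start codons
--     start_codon = 'ATG'
--     stop_codons = ['TAA', 'TAG', 'TGA']
--     kozak = 0
--     orfs = []
--     check_kozak = _kozak_strength
--     # split seq into 3 reading frames
--     reading_frames = [sequence[i:] for i in range(3)]
--     for seq in reading_frames:
--         in_orf = False
--         orf_start = None
--
--         for codon_idx in range(0, len(seq), 3):
--             next_codon = seq[codon_idx:codon_idx + 3]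
--             if not in_orf:
--                 if next_codon == start_codon:
--                     kozak = check_kozak(seq[codon_idx - 3:codon_idx + 4])
--                     if kozak == 3:
--                         in_orf = True
--                         orf_start = codon_idx
--             else:
--                 if next_codon in stop_codons:
--                     orfs.append((orf_start, codon_idx + 3))
--                     in_orf = False
--     return len(orfs)
-- ===== SOURCE B (Python) =====
-- def count_strong_orfs(sequence: str, kmer_length: int) -> int:
--     # Index-then-scan: per reading frame, first collect all codon-aligned
--     # strong-Kozak start positions, then count non-overlapping ORFs with a
--     # resume pointer; a start whose scan finds no stop ends the frame (no
--     # later aligned start can find one either).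
--     stop_codons = ('TAA', 'TAG', 'TGA')
--     total = 0
--     for f in range(3):
--         frame = sequence[f:]
--         m = len(frame)
--         starts = [p for p in range(3, m - 3, 3)
--                   if frame[p:p + 3] == 'ATG'
--                   and frame[p - 3] in 'AG'
--                   and frame[p + 3] == 'G']
--         resume = 0
--         for p in starts:
--             if p < resume:
--                 continue
--             e = p + 3
--             while e + 3 <= m and frame[e:e + 3] not in stop_codons:
--                 e += 3
--             if e + 3 <= m:
--                 total += 1
--                 resume = e + 3
--             else:
--                 break
--     return total
-- ===== Notes on version B (the rewrite author's own statement) =====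
-- stated objective: alternative
-- what changed: Replaces A's single-pass three-state codon machine per frame with a two-phase scheme: first build an index of codon-aligned strong-Kozak start positions, then count non-overlapping ORFs with a resume pointer over that index, breaking out of a frame as soon as one stop-scan fails.
import Mathlib
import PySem

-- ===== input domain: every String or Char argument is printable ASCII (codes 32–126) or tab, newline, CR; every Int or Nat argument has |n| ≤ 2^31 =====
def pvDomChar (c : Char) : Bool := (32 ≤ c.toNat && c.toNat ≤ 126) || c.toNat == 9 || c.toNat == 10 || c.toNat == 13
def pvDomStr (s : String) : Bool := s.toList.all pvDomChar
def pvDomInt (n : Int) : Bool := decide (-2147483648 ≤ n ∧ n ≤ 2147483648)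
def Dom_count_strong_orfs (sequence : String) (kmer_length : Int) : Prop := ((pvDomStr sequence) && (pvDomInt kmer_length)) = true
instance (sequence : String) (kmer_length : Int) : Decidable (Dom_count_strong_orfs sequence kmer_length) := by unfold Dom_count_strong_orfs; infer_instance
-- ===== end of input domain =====

-- B replaces A's single-pass three-state codon machine with a precomputed index of
-- strong-Kozak starts plus a resume-pointer stop scan (objective: alternative, same cost).

-- ===== PORT A =====
def pvATG : List Char := ['A', 'T', 'G']
def pvStops : List (List Char) := [['T', 'A', 'A'], ['T', 'A', 'G'], ['T', 'G', 'A']]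

-- _kozak_strength; indexing sequence[0]/sequence[6] is safe under the len == 7 guard,
-- so pyGetD with a dummy default is exact.
def pvKozak (w : List Char) : Int :=
  if w.length ≠ 7 then 0
  else if PySem.List.slice w (some 3) (some 6) = pvATG then
    (1 : Int)
      + (if PySem.List.pyGetD w 0 ' ' = 'A' ∨ PySem.List.pyGetD w 0 ' ' = 'G' then 1 else 0)
      + (if PySem.List.pyGetD w 6 ' ' = 'G' then 1 else 0)
  else 0

-- one step of A's inner loop; state = (in_orf, orf_start, orfs)
def pvStepA (seq : List Char) (st : Bool × Option Int × List (Option Int × Int))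
    (codon_idx : Int) : Bool × Option Int × List (Option Int × Int) :=
  let next_codon := PySem.List.slice seq (some codon_idx) (some (codon_idx + 3))
  if st.1 = false then
    if next_codon = pvATG then
      if pvKozak (PySem.List.slice seq (some (codon_idx - 3)) (some (codon_idx + 4))) = 3 then
        (true, some codon_idx, st.2.2)
      else st
    else st
  else
    if next_codon ∈ pvStops then (false, st.2.1, st.2.2 ++ [(st.2.1, codon_idx + 3)]) else st

def count_strong_orfs (sequence : String) (kmer_length : Int) : Int :=
  let s := sequence.toList
  let reading_frames := (PySem.List.pyRange 0 3 1).map (fun i => PySem.List.slice s (some i) none)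
  let orfs := reading_frames.foldl
    (fun (orfs : List (Option Int × Int)) seq =>
      ((PySem.List.pyRange 0 (seq.length : Int) 3).foldl (pvStepA seq) (false, none, orfs)).2.2)
    []
  (orfs.length : Int)

-- ===== PORT B =====
-- B's while loop scanning codons for the first stop
def pvFindStop (frame : List Char) (e : Int) : Option Int :=
  if h : e + 3 ≤ (frame.length : Int) then
    if PySem.List.slice frame (some e) (some (e + 3)) ∈ pvStops then some e
    else pvFindStop frame (e + 3)
  else none
termination_by ((frame.length : Int) + 3 - e).toNat
decreasing_by omega

-- B's for-loop over the start index (with continue / break)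
def pvBLoop (frame : List Char) : List Int → Int → Int → Int
  | [], _, total => total
  | p :: ps, resume, total =>
    if p < resume then pvBLoop frame ps resume total
    else
      match pvFindStop frame (p + 3) with
      | some e => pvBLoop frame ps (e + 3) (total + 1)
      | none => total

def count_strong_orfs_alt (sequence : String) (kmer_length : Int) : Int :=
  let s := sequence.toList
  (PySem.List.pyRange 0 3 1).foldl
    (fun (total : Int) f =>
      let frame := PySem.List.slice s (some f) none
      let m : Int := (frame.length : Int)
      let starts := (PySem.List.pyRange 3 (m - 3) 3).filter (fun p =>
        decide (PySem.List.slice frame (some p) (some (p + 3)) = pvATG)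
          && decide (PySem.List.pyGetD frame (p - 3) ' ' = 'A'
                      ∨ PySem.List.pyGetD frame (p - 3) ' ' = 'G')
          && decide (PySem.List.pyGetD frame (p + 3) ' ' = 'G'))
      pvBLoop frame starts 0 total)
    0

-- ===== PRECONDITION & SPEC =====
def Spec_count_strong_orfs (sequence : String) (kmer_length : Int) (out : Int) : Prop := out = count_strong_orfs_alt sequence kmer_length
instance (sequence : String) (kmer_length : Int) (out : Int) : Decidable (Spec_count_strong_orfs sequence kmer_length out) := by unfold Spec_count_strong_orfs; infer_instance

-- ===== CLAIM (what is proved, stated in full; the proofs are below) =====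
def Claim_equal_count_strong_orfs : Prop := ∀ (sequence : String) (kmer_length : Int), Dom_count_strong_orfs sequence kmer_length → Spec_count_strong_orfs sequence kmer_length (count_strong_orfs sequence kmer_length)

-- ===== LEMMAS AND PROOFS =====

-- A's kozak == 3 test at position p
abbrev pvStrong (frame : List Char) (p : Int) : Prop :=
  PySem.List.slice frame (some p) (some (p + 3)) = pvATG ∧
    pvKozak (PySem.List.slice frame (some (p - 3)) (some (p + 4))) = 3

-- abstract count of A's machine from position p onward
def pvRecA (frame : List Char) (p : Int) (inOrf : Bool) : Nat :=
  if _h : p < (frame.length : Int) then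
    if inOrf then
      if PySem.List.slice frame (some p) (some (p + 3)) ∈ pvStops then
        1 + pvRecA frame (p + 3) false
      else pvRecA frame (p + 3) true
    else
      if pvStrong frame p then pvRecA frame (p + 3) true
      else pvRecA frame (p + 3) false
  else 0
termination_by ((frame.length : Int) - p).toNat
decreasing_by all_goals omega

-- B's filter predicate
def pvCondB (frame : List Char) (p : Int) : Bool :=
  decide (PySem.List.slice frame (some p) (some (p + 3)) = pvATG)
    && decide (PySem.List.pyGetD frame (p - 3) ' ' = 'A'
                ∨ PySem.List.pyGetD frame (p - 3) ' ' = 'G')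
    && decide (PySem.List.pyGetD frame (p + 3) ' ' = 'G')


theorem pvPyRange3_nil (a b : Int) (h : b ≤ a) : PySem.List.pyRange a b 3 = [] := by
  rw [PySem.List.pyRange_of_pos a b (by norm_num)]
  simp [if_neg (by omega : ¬ a < b)]

theorem pvPyRange3_cons (a b : Int) (h : a < b) :
    PySem.List.pyRange a b 3 = a :: PySem.List.pyRange (a + 3) b 3 := by
  rw [PySem.List.pyRange_of_pos a b (by norm_num), PySem.List.pyRange_of_pos (a+3) b (by norm_num)]
  rw [if_pos h]
  have hcount : ((b - a + 3 - 1) / 3).toNat = ((if a + 3 < b then ((b - (a+3) + 3 - 1) / 3).toNat else 0)) + 1 := by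
    split_ifs with h2 <;> omega
  rw [hcount, List.range_succ_eq_map]
  simp [List.map_map, Function.comp]
  intro k _
  ring

theorem pvKozak_eq_three_iff (w : List Char) :
    pvKozak w = 3 ↔ w.length = 7 ∧ PySem.List.slice w (some 3) (some 6) = pvATG ∧
      (PySem.List.pyGetD w 0 ' ' = 'A' ∨ PySem.List.pyGetD w 0 ' ' = 'G') ∧
      PySem.List.pyGetD w 6 ' ' = 'G' := by
  unfold pvKozak
  split_ifs with h1 h2 h3 h4 h5 <;> simp_all

theorem pvStop_imp_le {frame : List Char} {p : Int} (h0 : 0 ≤ p)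
    (h : PySem.List.slice frame (some p) (some (p + 3)) ∈ pvStops) :
    p + 3 ≤ (frame.length : Int) := by
  have hl : (PySem.List.slice frame (some p) (some (p + 3))).length = 3 := by
    simp [pvStops] at h
    rcases h with h | h | h <;> rw [h] <;> rfl
  rw [PySem.List.length_slice] at hl
  simp [PySem.List.clampIdx] at hl
  split_ifs at hl <;> omega

theorem pvStrong_bounds {frame : List Char} {p : Int} (h0 : 0 ≤ p) (h : pvStrong frame p) :
    3 ≤ p ∧ p + 4 ≤ (frame.length : Int) := by
  have h7 := ((pvKozak_eq_three_iff _).mp h.2).1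
  rw [PySem.List.length_slice] at h7
  simp [PySem.List.clampIdx] at h7
  split_ifs at h7 <;> omega

theorem pvStrong_iff_cond {frame : List Char} {p : Int} (h3 : 3 ≤ p)
    (h4 : p + 4 ≤ (frame.length : Int)) : pvStrong frame p ↔ pvCondB frame p = true := by
  have hd : (p - 3).toNat + 3 = p.toNat := by omega
  have hw : PySem.List.slice frame (some (p - 3)) (some (p + 4))
      = (frame.drop (p - 3).toNat).take 7 := by
    rw [PySem.List.slice_of_nonneg frame (by omega) (by omega) (by omega) (by omega)]
    congr 1
    omega
  have hwlen : ((frame.drop (p - 3).toNat).take 7).length = 7 := by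
    simp
    omega
  have hcodon : PySem.List.slice frame (some p) (some (p + 3))
      = (frame.drop p.toNat).take 3 := by
    rw [PySem.List.slice_of_nonneg frame (by omega) (by omega) (by omega) (by omega)]
    congr 1
    omega
  have hs36 : PySem.List.slice ((frame.drop (p - 3).toNat).take 7) (some 3) (some 6)
      = (frame.drop p.toNat).take 3 := by
    rw [PySem.List.slice_of_nonneg _ (by omega) (by omega) (by rw [hwlen]; omega)
      (by rw [hwlen]; omega)]
    simp only [List.drop_take, List.take_take, List.drop_drop,
      show Int.toNat 6 = 6 from rfl, show Int.toNat 3 = 3 from rfl]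
    rw [hd]
    norm_num
  have hget0 : PySem.List.pyGetD ((frame.drop (p - 3).toNat).take 7) 0 ' '
      = PySem.List.pyGetD frame (p - 3) ' ' := by
    rw [PySem.List.pyGetD_eq_getElem _ _ (by omega) (by rw [hwlen]; omega),
        PySem.List.pyGetD_eq_getElem _ _ (by omega) (by omega)]
    simp [List.getElem_take, List.getElem_drop]
  have hget6 : PySem.List.pyGetD ((frame.drop (p - 3).toNat).take 7) 6 ' '
      = PySem.List.pyGetD frame (p + 3) ' ' := by
    rw [PySem.List.pyGetD_eq_getElem _ _ (by omega) (by rw [hwlen]; omega),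
        PySem.List.pyGetD_eq_getElem _ _ (by omega) (by omega)]
    simp [List.getElem_take, List.getElem_drop]
    congr 1
    omega
  unfold pvStrong pvCondB
  rw [hw, pvKozak_eq_three_iff, hwlen, hs36, hget0, hget6, hcodon]
  simp
  tauto

theorem pvFindStop_some {frame : List Char} {e x : Int}
    (h : pvFindStop frame e = some x) :
    e ≤ x ∧ x + 3 ≤ (frame.length : Int) ∧ (3 : Int) ∣ x - e := by
  suffices H : ∀ n e, (((frame.length : Int) + 3 - e).toNat ≤ n) →
      pvFindStop frame e = some x →
      e ≤ x ∧ x + 3 ≤ (frame.length : Int) ∧ (3 : Int) ∣ x - e from H _ e le_rfl h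
  intro n
  induction n with
  | zero =>
    intro e hn h
    rw [pvFindStop, dif_neg (by omega : ¬ e + 3 ≤ (frame.length : Int))] at h
    simp at h
  | succ n ih =>
    intro e hn h
    by_cases hle : e + 3 ≤ (frame.length : Int)
    · rw [pvFindStop, dif_pos hle] at h
      split_ifs at h with hs
      · cases h
        exact ⟨le_refl _, hle, by simp⟩
      · obtain ⟨h1, h2, h3⟩ := ih (e + 3) (by omega) h
        exact ⟨by omega, h2, by omega⟩
    · rw [pvFindStop, dif_neg hle] at h
      simp at h

theorem pvRecA_true_eq (frame : List Char) (p : Int) (h0 : 0 ≤ p) :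
    pvRecA frame p true =
      (match pvFindStop frame p with
       | some e => 1 + pvRecA frame (e + 3) false
       | none => 0) := by
  suffices H : ∀ n p, 0 ≤ p → (((frame.length : Int) - p).toNat ≤ n) →
      pvRecA frame p true =
        (match pvFindStop frame p with
         | some e => 1 + pvRecA frame (e + 3) false
         | none => 0) from H _ p h0 le_rfl
  intro n
  induction n with
  | zero =>
    intro p h0 hn
    rw [pvRecA, dif_neg (by omega : ¬ p < (frame.length : Int)),
      pvFindStop, dif_neg (by omega : ¬ p + 3 ≤ (frame.length : Int))]
  | succ n ih =>
    intro p h0 hn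
    by_cases hpm : p < (frame.length : Int)
    · rw [pvRecA, dif_pos hpm]
      simp only [if_true]
      by_cases hs : PySem.List.slice frame (some p) (some (p + 3)) ∈ pvStops
      · have hle := pvStop_imp_le h0 hs
        rw [if_pos hs, pvFindStop, dif_pos hle, if_pos hs]
      · rw [if_neg hs]
        by_cases hle : p + 3 ≤ (frame.length : Int)
        · rw [pvFindStop, dif_pos hle, if_neg hs]
          exact ih (p + 3) (by omega) (by omega)
        · rw [pvFindStop, dif_neg hle]
          rw [ih (p + 3) (by omega) (by omega),
            pvFindStop, dif_neg (by omega : ¬ p + 3 + 3 ≤ (frame.length : Int))]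
    · rw [pvRecA, dif_neg hpm, pvFindStop, dif_neg (by omega)]

theorem pvRecA_false_far (frame : List Char) (p : Int) (h0 : 0 ≤ p)
    (h : (frame.length : Int) < p + 4) : pvRecA frame p false = 0 := by
  suffices H : ∀ n p, 0 ≤ p → (frame.length : Int) < p + 4 →
      (((frame.length : Int) - p).toNat ≤ n) → pvRecA frame p false = 0 from
    H _ p h0 h le_rfl
  intro n
  induction n with
  | zero => intro p h0 h hn; rw [pvRecA, dif_neg (by omega : ¬ p < (frame.length : Int))]
  | succ n ih =>
    intro p h0 h hn
    by_cases hpm : p < (frame.length : Int)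
    · rw [pvRecA, dif_pos hpm]
      simp only [Bool.false_eq_true, if_false]
      have hns : ¬ pvStrong frame p := fun hst => by
        have := pvStrong_bounds h0 hst; omega
      rw [if_neg hns]
      exact ih (p + 3) (by omega) (by omega) (by omega)
    · rw [pvRecA, dif_neg hpm]

theorem pvBLoop_eq_recA (frame : List Char) (p r t : Int) (hp : 3 ≤ p) (hdp : (3:Int) ∣ p)
    (hr : 0 ≤ r) (hdr : (3:Int) ∣ r) :
    pvBLoop frame (((PySem.List.pyRange p ((frame.length : Int) - 3) 3).filter
        (pvCondB frame))) r t = t + (pvRecA frame (max p r) false : Int) := by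
  suffices H : ∀ n p r t, 3 ≤ p → (3:Int) ∣ p → 0 ≤ r → (3:Int) ∣ r →
      (((frame.length : Int) - p).toNat ≤ n) →
      pvBLoop frame (((PySem.List.pyRange p ((frame.length : Int) - 3) 3).filter
        (pvCondB frame))) r t = t + (pvRecA frame (max p r) false : Int) from
    H _ p r t hp hdp hr hdr le_rfl
  intro n
  induction n with
  | zero =>
    intro p r t hp hdp hr hdr hn
    rw [pvPyRange3_nil _ _ (by omega), pvRecA,
      dif_neg (by omega : ¬ max p r < (frame.length : Int))]
    simp [pvBLoop]
  | succ n ih =>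
    intro p r t hp hdp hr hdr hn
    by_cases hend : (frame.length : Int) - 3 ≤ p
    · rw [pvPyRange3_nil _ _ (by omega),
        pvRecA_false_far frame (max p r) (by omega) (by omega)]
      simp [pvBLoop]
    · have hp4 : p + 4 ≤ (frame.length : Int) := by omega
      rw [pvPyRange3_cons _ _ (by omega), List.filter_cons]
      by_cases hc : pvCondB frame p = true
      · rw [if_pos hc]
        have hst : pvStrong frame p := (pvStrong_iff_cond hp hp4).mpr hc
        simp only [pvBLoop]
        by_cases hpr : p < r
        · rw [if_pos hpr, ih (p + 3) r t (by omega) (by omega) hr hdr (by omega)]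
          have hmax : max (p + 3) r = max p r := by omega
          rw [hmax]
        · rw [if_neg hpr]
          have hmaxp : max p r = p := by omega
          have hArec : pvRecA frame p false = pvRecA frame (p + 3) true := by
            rw [pvRecA, dif_pos (by omega : p < (frame.length : Int))]
            simp only [Bool.false_eq_true, if_false]
            rw [if_pos hst]
          cases hfs : pvFindStop frame (p + 3) with
          | some e =>
            dsimp only
            obtain ⟨he1, he2, he3⟩ := pvFindStop_some hfs
            rw [ih (p + 3) (e + 3) (t + 1) (by omega) (by omega) (by omega)
              (by obtain ⟨k, hk⟩ := he3; obtain ⟨j, hj⟩ := hdp; exact ⟨k + j + 2, by omega⟩)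
              (by omega)]
            have hmax2 : max (p + 3) (e + 3) = e + 3 := by omega
            rw [hmax2, hmaxp, hArec, pvRecA_true_eq frame (p + 3) (by omega), hfs]
            push_cast
            ring
          | none =>
            dsimp only
            rw [hmaxp, hArec, pvRecA_true_eq frame (p + 3) (by omega), hfs]
            simp
      · rw [if_neg hc]
        have hns : ¬ pvStrong frame p := fun hst => hc ((pvStrong_iff_cond hp hp4).mp hst)
        rw [ih (p + 3) r t (by omega) (by omega) hr hdr (by omega)]
        rcases (by omega : r ≤ p ∨ p < r) with hrp | hrp
        · have h1 : max (p + 3) r = p + 3 := by omega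
          have h2 : max p r = p := by omega
          have hrec : pvRecA frame p false = pvRecA frame (p + 3) false := by
            rw [pvRecA, dif_pos (by omega : p < (frame.length : Int))]
            simp only [Bool.false_eq_true, if_false]
            rw [if_neg hns]
          rw [h1, h2, hrec]
        · have hr3 : p + 3 ≤ r := by omega
          have h1 : max (p + 3) r = max p r := by omega
          rw [h1]

theorem pvFoldA_eq_recA (frame : List Char) (p : Int) (h0 : 0 ≤ p)
    (inOrf : Bool) (os : Option Int) (L : List (Option Int × Int)) :
    ((PySem.List.pyRange p (frame.length : Int) 3).foldl (pvStepA frame)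
        (inOrf, os, L)).2.2.length = L.length + pvRecA frame p inOrf := by
  suffices H : ∀ n p, 0 ≤ p → (((frame.length : Int) - p).toNat ≤ n) →
      ∀ (inOrf : Bool) (os : Option Int) (L : List (Option Int × Int)),
      ((PySem.List.pyRange p (frame.length : Int) 3).foldl (pvStepA frame)
        (inOrf, os, L)).2.2.length = L.length + pvRecA frame p inOrf from
    H _ p h0 le_rfl inOrf os L
  intro n
  induction n with
  | zero =>
    intro p h0 hn inOrf os L
    rw [pvPyRange3_nil _ _ (by omega), pvRecA,
      dif_neg (by omega : ¬ p < (frame.length : Int))]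
    simp
  | succ n ih =>
    intro p h0 hn inOrf os L
    by_cases hpm : p < (frame.length : Int)
    · rw [pvPyRange3_cons _ _ (by omega), List.foldl_cons, pvRecA, dif_pos hpm]
      cases inOrf with
      | false =>
        simp only [Bool.false_eq_true, if_false]
        by_cases hA : PySem.List.slice frame (some p) (some (p + 3)) = pvATG
        · by_cases hK :
            pvKozak (PySem.List.slice frame (some (p - 3)) (some (p + 4))) = 3
          · have hst : pvStrong frame p := ⟨hA, hK⟩
            have hstep : pvStepA frame (false, os, L) p = (true, some p, L) := by
              simp only [pvStepA]
              simp only [if_true]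
              rw [if_pos hA, if_pos hK]
            rw [hstep, if_pos hst]
            exact ih (p + 3) (by omega) (by omega) true (some p) L
          · have hns : ¬ pvStrong frame p := fun hst => hK hst.2
            have hstep : pvStepA frame (false, os, L) p = (false, os, L) := by
              simp only [pvStepA]
              simp only [if_true]
              rw [if_pos hA, if_neg hK]
            rw [hstep, if_neg hns]
            exact ih (p + 3) (by omega) (by omega) false os L
        · have hns : ¬ pvStrong frame p := fun hst => hA hst.1
          have hstep : pvStepA frame (false, os, L) p = (false, os, L) := by
            simp only [pvStepA]
            simp only [if_true]
            rw [if_neg hA]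
          rw [hstep, if_neg hns]
          exact ih (p + 3) (by omega) (by omega) false os L
      | true =>
        simp only [if_true]
        by_cases hs : PySem.List.slice frame (some p) (some (p + 3)) ∈ pvStops
        · have hstep : pvStepA frame (true, os, L) p
              = (false, os, L ++ [(os, p + 3)]) := by
            simp only [pvStepA]
            simp only [Bool.true_eq_false, if_false]
            rw [if_pos hs]
          rw [hstep, if_pos hs]
          rw [ih (p + 3) (by omega) (by omega) false os (L ++ [(os, p + 3)])]
          simp
          omega
        · have hstep : pvStepA frame (true, os, L) p = (true, os, L) := by
            simp only [pvStepA]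
            simp only [Bool.true_eq_false, if_false]
            rw [if_neg hs]
          rw [hstep, if_neg hs]
          exact ih (p + 3) (by omega) (by omega) true os L
    · rw [pvPyRange3_nil _ _ (by omega), pvRecA, dif_neg hpm]
      simp

theorem pvRecA_zero_eq_three (frame : List Char) :
    pvRecA frame 0 false = pvRecA frame 3 false := by
  by_cases h : (0 : Int) < (frame.length : Int)
  · rw [pvRecA, dif_pos h]
    simp only [Bool.false_eq_true, if_false]
    rw [if_neg (fun hst => by have := pvStrong_bounds (by omega) hst; omega)]
    norm_num
  · rw [pvRecA, dif_neg h, pvRecA, dif_neg (by omega : ¬ (3:Int) < (frame.length : Int))]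


-- ===== VERDICT (by name: the statement is the Claim_ definition above) =====
theorem count_strong_orfs_spec : Claim_equal_count_strong_orfs := by
  intro sequence kmer_length _
  unfold Spec_count_strong_orfs count_strong_orfs count_strong_orfs_alt
  have h012 : PySem.List.pyRange 0 3 1 = [0, 1, 2] := by decide
  rw [h012]
  simp only [List.map_cons, List.map_nil, List.foldl_cons, List.foldl_nil]
  have hcond : ∀ frame : List Char, (fun p : Int =>
      decide (PySem.List.slice frame (some p) (some (p + 3)) = pvATG)
        && decide (PySem.List.pyGetD frame (p - 3) ' ' = 'A'
                    ∨ PySem.List.pyGetD frame (p - 3) ' ' = 'G')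
        && decide (PySem.List.pyGetD frame (p + 3) ' ' = 'G')) = pvCondB frame :=
    fun _ => rfl
  rw [hcond, hcond, hcond]
  rw [pvFoldA_eq_recA _ 0 (by norm_num), pvFoldA_eq_recA _ 0 (by norm_num),
    pvFoldA_eq_recA _ 0 (by norm_num)]
  rw [pvBLoop_eq_recA _ 3 0 _ (by norm_num) (by norm_num) (by norm_num) (by norm_num),
    pvBLoop_eq_recA _ 3 0 _ (by norm_num) (by norm_num) (by norm_num) (by norm_num),
    pvBLoop_eq_recA _ 3 0 _ (by norm_num) (by norm_num) (by norm_num) (by norm_num)]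
  have hmax : max (3 : Int) 0 = 3 := by norm_num
  rw [hmax]
  rw [pvRecA_zero_eq_three, pvRecA_zero_eq_three, pvRecA_zero_eq_three]
  push_cast
  simp
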